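-- pv_equiv track=rewrite | github.com/royc0003/AOC2023 | day_2/day_2.py | extract_game_no
-- ===== SOURCE A (Python) =====
-- def extract_game_no(game_input, cur_i):
--     game_no = 0
--     while game_input[cur_i] != ':':
--         if game_input[cur_i].isnumeric():
--             game_no *= 10
--             game_no += int(game_input[cur_i])
--         cur_i += 1
--     return [game_no, cur_i]
-- ===== SOURCE B (Python) =====
-- def extract_game_no(game_input, cur_i):
--     end = game_input.index(':', cur_i)
--     digits = [ch for ch in game_input[cur_i:end] if ch.isnumeric()]
--     game_no = sum(int(d) * 10 ** i for i, d in enumerate(reversed(digits)))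
--     return [game_no, end]
-- ===== Notes on version B (the rewrite author's own statement) =====
-- stated objective: simpler
-- what changed: B locates the colon with str.index, slices out the scanned segment, filters its numeric characters and sums digit*10**position, instead of A's character-at-a-time while loop with a Horner accumulator.
-- outside the precondition, e.g. on extract_game_no('x:', -1): A returns [0, -1], B returns [0, 1]
import Mathlib
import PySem

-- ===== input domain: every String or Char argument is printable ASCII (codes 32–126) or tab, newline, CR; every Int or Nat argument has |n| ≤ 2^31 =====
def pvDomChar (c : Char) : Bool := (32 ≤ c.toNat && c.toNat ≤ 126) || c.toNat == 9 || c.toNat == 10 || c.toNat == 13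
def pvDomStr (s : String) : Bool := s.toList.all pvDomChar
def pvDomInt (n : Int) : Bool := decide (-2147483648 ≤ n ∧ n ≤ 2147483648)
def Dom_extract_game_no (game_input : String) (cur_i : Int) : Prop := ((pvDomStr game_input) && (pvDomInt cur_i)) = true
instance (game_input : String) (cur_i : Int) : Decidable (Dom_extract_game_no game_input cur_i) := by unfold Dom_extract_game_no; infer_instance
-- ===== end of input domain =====

-- B finds the colon with str.index, slices out the scanned segment, filters its numeric
-- characters and sums digit*10**position — simpler than A's char-at-a-time Horner loop.

-- ===== PORT A =====
-- int(one ASCII char) ported as ofChars?; `.isnumeric()` ported as Chars.isdigit — on the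
-- stated printable-ASCII domain the two predicates coincide (exactly '0'-'9').
def pvIntOfChar (c : Char) : Int := (PySem.Int.ofChars? [c]).getD 0

-- A's while loop; fuel is an upper bound on the iterations actually performed
-- (the loop stops at ':' or, where Python raises IndexError, at pyGet? = none)
def extractLoopA (s : List Char) (game_no : Int) (i : Int) : Nat → List Int
  | 0 => [game_no, i]
  | fuel + 1 =>
    match PySem.List.pyGet? s i with
    | none => [game_no, i]          -- Python raises IndexError here (outside Pre_)
    | some c =>
      if c = ':' then [game_no, i]
      else if PySem.Chars.isdigit c then
        extractLoopA s (game_no * 10 + pvIntOfChar c) (i + 1) fuel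
      else extractLoopA s game_no (i + 1) fuel

def extract_game_no (game_input : String) (cur_i : Int) : List Int :=
  extractLoopA game_input.toList 0 cur_i (game_input.toList.length + cur_i.natAbs + 1)

-- ===== PORT B =====
def extract_game_no_alt (game_input : String) (cur_i : Int) : List Int :=
  let e := PySem.Str.findFrom game_input ":" cur_i      -- game_input.index(':', cur_i); ValueError (-1) is outside Pre_
  let digits := (PySem.List.slice game_input.toList (some cur_i) (some e)).filter PySem.Chars.isdigit
  let game_no := (PySem.List.enumerate digits.reverse).foldl
      (fun acc p => acc + pvIntOfChar p.2 * 10 ^ p.1.toNat) 0   -- 10 ** i, i ≥ 0 from enumerate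
  [game_no, e]

-- ===== PRECONDITION & SPEC =====
-- Pre_ restricts to the natural domain of a forward scan: a nonnegative start index with a
-- colon at or after it.  A negative cur_i (Python's from-the-end indexing, on which A's scan
-- can wrap from the end of the string back to its start and report a negative stop index) is
-- outside the natural domain and excluded; without a reachable colon both programs raise
-- (IndexError in A, ValueError in B).
def Pre_extract_game_no (game_input : String) (cur_i : Int) : Prop :=
  0 ≤ cur_i ∧ ':' ∈ game_input.toList.drop cur_i.toNat
instance (game_input : String) (cur_i : Int) : Decidable (Pre_extract_game_no game_input cur_i) := by
  unfold Pre_extract_game_no; infer_instance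
def pvWitness_extract_game_no : String × Int := ("Game 12: 3 red", 0)

def Spec_extract_game_no (game_input : String) (cur_i : Int) (out : List Int) : Prop := out = extract_game_no_alt game_input cur_i
instance (game_input : String) (cur_i : Int) (out : List Int) : Decidable (Spec_extract_game_no game_input cur_i out) := by unfold Spec_extract_game_no; infer_instance

-- ===== CLAIM (what is proved, stated in full; the proofs are below) =====
def Claim_equal_extract_game_no : Prop := ∀ (game_input : String) (cur_i : Int), Dom_extract_game_no game_input cur_i → Pre_extract_game_no game_input cur_i → Spec_extract_game_no game_input cur_i (extract_game_no game_input cur_i)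

-- ===== LEMMAS AND PROOFS =====

-- A's loop, run from index k over the segment pre (which contains no colon) up to the first
-- colon, performs a Horner fold over pre and stops at index k + pre.length.
theorem extractLoopA_run (pre : List Char) : ∀ (s suf : List Char) (k : Nat) (g : Int) (fuel : Nat),
    s.drop k = pre ++ ':' :: suf → ':' ∉ pre → pre.length < fuel →
    extractLoopA s g (↑k) fuel =
      [pre.foldl (fun a c => if PySem.Chars.isdigit c then a * 10 + pvIntOfChar c else a) g,
       ↑(k + pre.length)] := by
  induction pre with
  | nil =>
    intro s suf k g fuel hdrop _ hfuel
    cases fuel with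
    | zero => omega
    | succ fuel =>
      have hget : PySem.List.pyGet? s (↑k) = some ':' := by
        rw [PySem.List.pyGet?_natCast]
        have h0 : s[k]? = (s.drop k)[0]? := by simp [List.getElem?_drop]
        rw [h0, hdrop]; rfl
      simp [extractLoopA, hget]
  | cons c pre ih =>
    intro s suf k g fuel hdrop hnc hfuel
    cases fuel with
    | zero => simp at hfuel
    | succ fuel =>
      have hget : PySem.List.pyGet? s (↑k) = some c := by
        rw [PySem.List.pyGet?_natCast]
        have h0 : s[k]? = (s.drop k)[0]? := by simp [List.getElem?_drop]
        rw [h0, hdrop]; rfl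
      have hcne : c ≠ ':' := by intro h; exact hnc (by simp [h])
      have hdrop' : s.drop (k + 1) = pre ++ ':' :: suf := by
        have := congrArg List.tail hdrop
        simpa [List.tail_drop] using this
      have hnc' : ':' ∉ pre := fun h => hnc (List.mem_cons_of_mem _ h)
      have hfuel' : pre.length < fuel := by simp at hfuel; omega
      have hk1 : ((k : Int) + 1) = ((k + 1 : Nat) : Int) := by push_cast; ring
      have hstep : extractLoopA s g (↑k) (fuel + 1)
          = extractLoopA s (if PySem.Chars.isdigit c then g * 10 + pvIntOfChar c else g) ((↑k) + 1) fuel := by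
        by_cases hd : PySem.Chars.isdigit c = true <;> simp [extractLoopA, hget, hcne, hd]
      rw [hstep, hk1, ih s suf (k + 1) _ fuel hdrop' hnc' hfuel']
      simp only [List.foldl_cons, List.length_cons]
      congr 2
      omega

-- little-endian value of a digit list (proof-only helper)
def pvVal : List Char → Int
  | [] => 0
  | c :: t => pvIntOfChar c + 10 * pvVal t

-- the fold's accumulator enters additively
theorem posSum_foldl_add (l : List (Int × Char)) : ∀ (a : Int),
    l.foldl (fun acc p => acc + pvIntOfChar p.2 * 10 ^ p.1.toNat) a
      = a + l.foldl (fun acc p => acc + pvIntOfChar p.2 * 10 ^ p.1.toNat) 0 := by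
  induction l with
  | nil => intro a; simp
  | cons p t ih => intro a; rw [List.foldl_cons, List.foldl_cons, ih, ih (0 + _)]; ring

-- the positional sum started at index s is 10^s times the little-endian value
theorem posSum_eq_val (xs : List Char) : ∀ (s : Nat),
    (PySem.List.enumerate xs ((s : Nat) : Int)).foldl
        (fun acc p => acc + pvIntOfChar p.2 * 10 ^ p.1.toNat) 0
      = 10 ^ s * pvVal xs := by
  induction xs with
  | nil => intro s; simp [PySem.List.enumerate, pvVal]
  | cons c t ih =>
    intro s
    rw [PySem.List.enumerate_cons, List.foldl_cons, posSum_foldl_add]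
    have hs1 : ((s : Nat) : Int) + 1 = (((s + 1 : Nat)) : Int) := by push_cast; ring
    rw [hs1, ih (s + 1)]
    simp only [Int.toNat_natCast, pvVal]
    ring

-- the Horner fold over ds is the little-endian value of ds reversed
theorem horner_eq_val (ds : List Char) :
    ds.foldl (fun a c => a * 10 + pvIntOfChar c) 0 = pvVal ds.reverse := by
  induction ds using List.reverseRecOn with
  | nil => simp [pvVal]
  | append_singleton t c ih =>
    rw [List.foldl_append, List.foldl_cons, List.foldl_nil, ih, List.reverse_append]
    simp [pvVal]
    ring

-- Horner fold over the digit list equals the positional sum that B computes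
theorem horner_eq_posSum (ds : List Char) :
    ds.foldl (fun a c => a * 10 + pvIntOfChar c) 0
      = (PySem.List.enumerate ds.reverse).foldl
          (fun acc p => acc + pvIntOfChar p.2 * 10 ^ p.1.toNat) 0 := by
  rw [horner_eq_val]
  have := posSum_eq_val ds.reverse 0
  simpa using this.symm

-- [':'] is a prefix of a character list iff its head is ':'
theorem singleton_prefix_iff (l : List Char) : [':'] <+: l ↔ l.head? = some ':' := by
  cases l with
  | nil => simp
  | cons x t =>
    constructor
    · intro h
      obtain ⟨r, hr⟩ := h
      simp only [List.singleton_append, List.cons.injEq] at hr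
      rw [List.head?_cons, ← hr.1]
    · intro h
      simp only [List.head?_cons, Option.some.injEq] at h
      exact ⟨t, by simp [h]⟩

-- splitting a list at its first colon
theorem split_at_first (l : List Char) (h : ':' ∈ l) :
    l = l.takeWhile (· ≠ ':') ++ ':' :: (l.dropWhile (· ≠ ':')).tail := by
  induction l with
  | nil => cases h
  | cons x t ih =>
    by_cases hx : x = ':'
    · subst hx; simp
    · have ht : ':' ∈ t := by cases List.mem_cons.mp h with
        | inl h' => exact absurd h'.symm hx
        | inr h' => exact h'
      have hd : (x :: t).takeWhile (· ≠ ':') = x :: t.takeWhile (· ≠ ':') := by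
        simp [hx]
      have hD : (x :: t).dropWhile (· ≠ ':') = t.dropWhile (· ≠ ':') := by
        simp [hx]
      rw [hd, hD, List.cons_append]
      exact congrArg (x :: ·) (ih ht)

-- ===== VERDICT (by name: the statement is the Claim_ definition above) =====
theorem extract_game_no_spec : Claim_equal_extract_game_no := by
  intro game_input cur_i _ hpre
  obtain ⟨hnn, hmem⟩ := hpre
  unfold Spec_extract_game_no
  set s := game_input.toList with hs
  set k := cur_i.toNat with hk
  have hcur : cur_i = (k : Int) := by omega
  have hsplit : s.drop k = ((s.drop k).takeWhile (· ≠ ':')) ++ ':' :: ((s.drop k).dropWhile (· ≠ ':')).tail :=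
    split_at_first _ hmem
  set pre := (s.drop k).takeWhile (· ≠ ':') with hpredef
  set suf := ((s.drop k).dropWhile (· ≠ ':')).tail with hsufdef
  have hnc : ':' ∉ pre := by
    intro h
    have := List.mem_takeWhile_imp h
    simp at this
  have hklen : k < s.length := by
    have hne : s.drop k ≠ [] := by rw [hsplit]; simp
    have := List.length_pos_iff.mpr hne
    rw [List.length_drop] at this
    omega
  have hprelen : k + pre.length < s.length := by
    have := congrArg List.length hsplit
    simp only [List.length_drop, List.length_append, List.length_cons] at this
    omega
  -- A's side
  have hA : extract_game_no game_input cur_i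
      = [pre.foldl (fun a c => if PySem.Chars.isdigit c then a * 10 + pvIntOfChar c else a) 0,
         ↑(k + pre.length)] := by
    unfold extract_game_no
    rw [← hs, hcur]
    have hfuel : pre.length < s.length + ((k : Int)).natAbs + 1 := by
      rw [Int.natAbs_natCast]; omega
    exact extractLoopA_run pre s suf k 0 _ hsplit hnc hfuel
  -- B's side: the index that str.index finds is k + pre.length
  have hdd : s.drop (k + pre.length) = (s.drop k).drop pre.length := by
    rw [List.drop_drop]
  have hsubpre : ([':'] : List Char) <+: s.drop (k + pre.length) := by
    rw [hdd, hsplit, List.drop_left]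
    exact ⟨suf, rfl⟩
  have hinfix : ([':'] : List Char) <:+: s.drop k := by
    have hsfx : s.drop (k + pre.length) <:+ s.drop k := by
      rw [hdd]; exact List.drop_suffix _ _
    exact hsubpre.isInfix.trans hsfx.isInfix
  have hkle : k ≤ s.length := le_of_lt hklen
  have hne1 : PySem.Chars.findFrom s [':'] (↑k) ≠ -1 := fun h =>
    ((PySem.Chars.findFrom_natCast_eq_neg_one_iff s [':'] k hkle).mp h) hinfix
  obtain ⟨hge, hpfx, hmin⟩ := PySem.Chars.findFrom_natCast_spec s [':'] k hkle hne1
  have hfind : PySem.Chars.findFrom s [':'] (↑k) = ↑(k + pre.length) := by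
    set j := (PySem.Chars.findFrom s [':'] (↑k)).toNat with hj
    have hjj : PySem.Chars.findFrom s [':'] (↑k) = (j : Int) := by omega
    rw [hjj]
    congr 1
    by_contra hne
    rcases Nat.lt_or_ge j (k + pre.length) with hlt | hge'
    · -- j < k + pre.length: position j lies inside pre, which has no colon
      have hkj : k ≤ j := by omega
      have hsj : s[j]? = some ':' := by
        have h1 : (s.drop j).head? = s[j]? := by
          simp [List.head?_eq_getElem?, List.getElem?_drop]
        rw [← h1]
        exact (singleton_prefix_iff _).mp hpfx
      have hpreg : pre[j - k]? = some ':' := by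
        have h2 : s[j]? = (s.drop k)[j - k]? := by
          rw [List.getElem?_drop]; congr 1; omega
        rw [h2, hsplit, List.getElem?_append_left (by omega)] at hsj
        exact hsj
      exact hnc (List.mem_of_getElem? hpreg)
    · exact hmin (k + pre.length) (by omega) (by omega) hsubpre
  have hslice : PySem.List.slice s (some ((k : Nat) : Int)) (some ((k + pre.length : Nat) : Int)) = pre := by
    have hcast : ((k + pre.length : Nat) : Int) = ((k : Nat) : Int) + ((pre.length : Nat) : Int) := by
      push_cast; ring
    rw [hcast, PySem.List.slice_natCast_add, hsplit, List.take_left]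
  have hB : extract_game_no_alt game_input cur_i
      = [((PySem.List.enumerate ((pre.filter PySem.Chars.isdigit).reverse)).foldl
          (fun acc p => acc + pvIntOfChar p.2 * 10 ^ p.1.toNat) 0), ↑(k + pre.length)] := by
    unfold extract_game_no_alt
    rw [PySem.Str.findFrom_eq]
    have hcolon : (":" : String).toList = [':'] := rfl
    rw [← hs, hcolon, hcur, hfind]
    simp only [hslice]
  rw [hA, hB]
  congr 1
  rw [← horner_eq_posSum, List.foldl_filter]
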